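-- pv_equiv track=rewrite | github.com/SebastienPJ/cisco9300_backup | cleanup.py | removeCommasQuotesColons
-- ===== SOURCE A (Python) =====
-- def removeCommasQuotesColons(arr):
--     endArr = []
--
--     for line in arr:
--         newLine = []
--         for item in line:
--
--             remove_comma = item.replace(',', '')
--             remove_quotes = remove_comma.replace('"', '')
--             remove_colon = remove_quotes.replace(':', '')
--
--             newLine.append(remove_colon)
--
--         while('' in newLine):
--             newLine.remove('')
--
--         endArr.append(newLine)
--
--     return endArr
-- ===== SOURCE B (Python) =====
-- _TABLE = str.maketrans('', '', ',":')
--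
-- def removeCommasQuotesColons(arr):
--     return [[t for t in (item.translate(_TABLE) for item in line) if t]
--             for line in arr]
-- ===== Notes on version B (the rewrite author's own statement) =====
-- stated objective: idiomatic
-- what changed: One translation table built once and a single character-wise translate pass per item replaces three full replace scans, and a filtering comprehension replaces the quadratic while-'' in-remove loop.
import Mathlib
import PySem

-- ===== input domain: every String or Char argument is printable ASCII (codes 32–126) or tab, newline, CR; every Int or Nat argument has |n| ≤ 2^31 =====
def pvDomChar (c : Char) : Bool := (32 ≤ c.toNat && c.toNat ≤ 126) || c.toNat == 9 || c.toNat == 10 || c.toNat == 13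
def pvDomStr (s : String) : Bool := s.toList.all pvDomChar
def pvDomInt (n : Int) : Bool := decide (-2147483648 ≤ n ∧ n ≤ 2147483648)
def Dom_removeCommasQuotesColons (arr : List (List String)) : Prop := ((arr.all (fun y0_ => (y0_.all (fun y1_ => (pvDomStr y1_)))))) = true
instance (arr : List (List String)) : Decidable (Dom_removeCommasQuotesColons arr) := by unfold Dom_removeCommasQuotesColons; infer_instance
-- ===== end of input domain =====

-- B replaces A's three full replace scans per item by one table-driven character pass
-- and A's quadratic while-''-in/remove loop by a filtering comprehension (idiomatic; same result).

-- ===== PORT A =====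
-- A's `while '' in newLine: newLine.remove('')` loop, step for step.
def pvDropEmpties (l : List String) : List String :=
  if h : "" ∈ l then pvDropEmpties ((PySem.List.remove? l "").getD l) else l
termination_by l.length
decreasing_by
  rw [PySem.List.remove?_eq_some_erase l "" h, Option.getD_some]
  rw [List.length_erase_of_mem h]
  exact Nat.sub_lt (List.length_pos_of_mem h) one_pos

def removeCommasQuotesColons (arr : List (List String)) : List (List String) :=
  arr.foldl (fun endArr line =>
    let newLine := line.foldl (fun nl item =>
      let remove_comma := PySem.Str.replace item "," ""
      let remove_quotes := PySem.Str.replace remove_comma "\"" ""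
      let remove_colon := PySem.Str.replace remove_quotes ":" ""
      nl ++ [remove_colon]) []
    endArr ++ [pvDropEmpties newLine]) []

-- ===== PORT B =====
-- str.maketrans('', '', ',":') + translate = delete exactly these characters in one pass.
def pvKeepChar (c : Char) : Bool := !(c == ',' || c == '"' || c == ':')

def pvTranslate (s : String) : String := String.ofList (s.toList.filter pvKeepChar)

def removeCommasQuotesColons_alt (arr : List (List String)) : List (List String) :=
  arr.map (fun line => (line.map pvTranslate).filter (fun t => t ≠ ""))

-- ===== PRECONDITION & SPEC =====
def Spec_removeCommasQuotesColons (arr : List (List String)) (out : List (List String)) : Prop := out = removeCommasQuotesColons_alt arr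
instance (arr : List (List String)) (out : List (List String)) : Decidable (Spec_removeCommasQuotesColons arr out) := by unfold Spec_removeCommasQuotesColons; infer_instance

-- ===== CLAIM (what is proved, stated in full; the proofs are below) =====
def Claim_equal_removeCommasQuotesColons : Prop := ∀ (arr : List (List String)), Dom_removeCommasQuotesColons arr → Spec_removeCommasQuotesColons arr (removeCommasQuotesColons arr)

-- ===== LEMMAS AND PROOFS =====

-- `replace` with a single-char pattern and empty replacement is a character filter.
theorem replace_go_single (c : Char) (fuel : Nat) (l acc : List Char)
    (h : l.length ≤ fuel) :
    PySem.Chars.replace.go [c] [] fuel l acc = acc.reverse ++ l.filter (· ≠ c) := by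
  induction fuel generalizing l acc with
  | zero =>
    have : l = [] := List.length_eq_zero_iff.mp (Nat.le_zero.mp h)
    subst this
    simp [PySem.Chars.replace.go]
  | succ n ih =>
    cases l with
    | nil => simp [PySem.Chars.replace.go]
    | cons a t =>
      by_cases hac : a = c
      · subst hac
        have : ([a].isPrefixOf (a :: t)) = true := by simp [List.isPrefixOf]
        rw [PySem.Chars.replace.go]
        simp only [this, if_pos]
        rw [ih _ _ (by simpa using Nat.le_of_succ_le_succ h)]
        simp
      · have : ([c].isPrefixOf (a :: t)) = false := by
          simp [List.isPrefixOf]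
          exact fun hh => (hac hh.symm).elim
        rw [PySem.Chars.replace.go]
        simp only [this]
        rw [if_neg (by simp_all)]
        rw [ih _ _ (by simpa using Nat.le_of_succ_le_succ h)]
        simp [hac]

theorem chars_replace_single (c : Char) (l : List Char) :
    PySem.Chars.replace l [c] [] = l.filter (· ≠ c) := by
  rw [PySem.Chars.replace, if_neg (by simp)]
  exact replace_go_single c l.length l [] (le_refl _)

-- A's three replaces equal B's single translate pass.
theorem replace_chain_eq_translate (s : String) :
    PySem.Str.replace (PySem.Str.replace (PySem.Str.replace s "," "") "\"" "") ":" ""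
      = pvTranslate s := by
  have key : (PySem.Str.replace (PySem.Str.replace (PySem.Str.replace s "," "") "\"" "") ":" "").toList
      = (pvTranslate s).toList := by
    rw [PySem.Str.toList_replace, PySem.Str.toList_replace, PySem.Str.toList_replace]
    show PySem.Chars.replace (PySem.Chars.replace (PySem.Chars.replace s.toList [','] []) ['"'] []) [':'] [] = _
    rw [chars_replace_single, chars_replace_single, chars_replace_single]
    simp only [pvTranslate, List.filter_filter]
    · rw [show (String.ofList (s.toList.filter pvKeepChar)).toList = s.toList.filter pvKeepChar from String.toList_ofList]
      apply List.filter_congr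
      intro x _
      simp [pvKeepChar]
      by_cases h1 : x = ',' <;> by_cases h2 : x = '"' <;> by_cases h3 : x = ':' <;> simp [h1, h2, h3]
  exact String.toList_inj.mp key

theorem filter_erase_empty (l : List String) (h : "" ∈ l) :
    (l.erase "").filter (fun t => t ≠ "") = l.filter (fun t => t ≠ "") := by
  induction l with
  | nil => simp at h
  | cons a t ih =>
    by_cases ha : a = ""
    · subst ha; simp
    · have hmem : "" ∈ t := by
        cases List.mem_cons.mp h with
        | inl he => exact absurd he.symm ha
        | inr ht => exact ht
      rw [List.erase_cons, if_neg (by simp [ha])]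
      simp only [List.filter_cons]
      rw [ih hmem]

-- A's while-remove loop computes the non-empty filter.
theorem pvDropEmpties_eq_filter (l : List String) :
    pvDropEmpties l = l.filter (fun t => t ≠ "") := by
  induction hn : l.length using Nat.strong_induction_on generalizing l with
  | _ n ih =>
    by_cases h : "" ∈ l
    · unfold pvDropEmpties
      rw [dif_pos h, PySem.List.remove?_eq_some_erase l "" h, Option.getD_some]
      subst hn
      have hlt : (l.erase "").length < l.length := by
        rw [List.length_erase_of_mem h]
        exact Nat.sub_lt (List.length_pos_of_mem h) one_pos
      rw [ih (l.erase "").length hlt _ rfl]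
      exact filter_erase_empty l h
    · unfold pvDropEmpties
      rw [dif_neg h]
      symm
      apply List.filter_eq_self.mpr
      intro a ha
      simp
      intro he; exact h (he ▸ ha)

theorem foldl_append_map {α β : Type} (f : α → β) (l : List α) (init : List β) :
    l.foldl (fun acc x => acc ++ [f x]) init = init ++ l.map f := by
  induction l generalizing init with
  | nil => simp
  | cons a t ih => simp [List.foldl_cons, ih, List.append_assoc]

-- ===== VERDICT (by name: the statement is the Claim_ definition above) =====
theorem removeCommasQuotesColons_spec : Claim_equal_removeCommasQuotesColons := by
  intro arr _
  show removeCommasQuotesColons arr = removeCommasQuotesColons_alt arr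
  have hline : ∀ (line : List String),
      line.foldl (fun nl item =>
        nl ++ [PySem.Str.replace (PySem.Str.replace (PySem.Str.replace item "," "") "\"" "") ":" ""]) []
      = line.map pvTranslate := by
    intro line
    rw [foldl_append_map
      (fun item => PySem.Str.replace (PySem.Str.replace (PySem.Str.replace item "," "") "\"" "") ":" "") line []]
    simp only [List.nil_append]
    exact List.map_congr_left (fun item _ => replace_chain_eq_translate item)
  show arr.foldl (fun endArr line =>
      endArr ++ [pvDropEmpties (line.foldl (fun nl item =>
        nl ++ [PySem.Str.replace (PySem.Str.replace (PySem.Str.replace item "," "") "\"" "") ":" ""]) [])]) []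
    = removeCommasQuotesColons_alt arr
  rw [foldl_append_map
    (fun line => pvDropEmpties (line.foldl (fun nl item =>
      nl ++ [PySem.Str.replace (PySem.Str.replace (PySem.Str.replace item "," "") "\"" "") ":" ""]) [])) arr []]
  simp only [List.nil_append]
  apply List.map_congr_left
  intro line _
  rw [hline, pvDropEmpties_eq_filter]
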